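-- pv_equiv track=rewrite | github.com/NAVEEN38160/Infosys_Young_Python_Professional | programming fundamentals using python part 2/Recursion/Exercise on Recursion in Python - Level 2.py | find_maximum_people
-- ===== SOURCE A (Python) =====
-- def human_pyramid(no_of_people):
--     #place the recursive code the you had written earlier for this function
--     if no_of_people==1:
--         return no_of_people*50
--     else:
--         return (no_of_people*50)+(human_pyramid(no_of_people-2))
--
-- def find_maximum_people(max_weight):
--     no_of_people=0
--     #write your logic here. You may invoke recursive function human_pyramid() wherever applicable
--     max_person=max_weight//50
--     if max_person%2==0:
--         max_person-=1
--     for i in range(1,max_person+1,2):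
--         result=human_pyramid(i)
--         if result<=max_weight:
--             no_of_people=i
--     return no_of_people
-- ===== SOURCE B (Python) =====
-- def find_maximum_people(max_weight):
--     # Binary search for the largest k >= 1 with 50*k*k <= max_weight; answer is 2*k - 1.
--     if max_weight < 50:
--         return 0
--     lo = 1
--     hi = max_weight // 50 + 1   # invariant: 50*lo*lo <= max_weight < 50*hi*hi
--     while lo + 1 < hi:
--         mid = (lo + hi) // 2
--         if 50 * mid * mid <= max_weight:
--             lo = mid
--         else:
--             hi = mid
--     return 2 * lo - 1
-- ===== Notes on version B (the rewrite author's own statement) =====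
-- stated objective: faster
-- what changed: Replaces the linear scan over all odd candidate counts (each recomputing the pyramid weight by a linear recursion, O(n^2) overall) with a binary search for the largest k with 50*k*k <= max_weight, returning 2*k-1.
import Mathlib
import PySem

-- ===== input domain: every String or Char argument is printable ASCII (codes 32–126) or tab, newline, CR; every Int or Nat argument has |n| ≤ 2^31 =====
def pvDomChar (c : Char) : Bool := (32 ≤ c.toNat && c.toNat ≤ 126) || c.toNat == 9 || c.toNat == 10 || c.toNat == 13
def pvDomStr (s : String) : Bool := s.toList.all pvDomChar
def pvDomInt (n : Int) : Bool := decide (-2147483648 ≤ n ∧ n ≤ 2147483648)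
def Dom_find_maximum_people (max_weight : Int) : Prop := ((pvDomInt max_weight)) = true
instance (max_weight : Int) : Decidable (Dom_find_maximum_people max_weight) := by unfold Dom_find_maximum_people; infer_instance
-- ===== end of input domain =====

-- B replaces A's linear scan over odd counts (quadratic overall) with a binary search
-- for the largest k with 50*k*k ≤ max_weight; objective: faster (asymptotic).

-- ===== PORT A =====
-- Python's human_pyramid recurses on n-2 and is only ever called with odd n ≥ 1;
-- the final `else 0` branch is a totality guard for arguments Python never reaches
-- (there Python would recurse forever).
def human_pyramid (no_of_people : Int) : Int :=
  if no_of_people = 1 then no_of_people * 50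
  else if 1 < no_of_people then no_of_people * 50 + human_pyramid (no_of_people - 2)
  else 0
termination_by no_of_people.toNat
decreasing_by omega

def find_maximum_people (max_weight : Int) : Int :=
  let max_person0 := PySem.Int.floordiv max_weight 50
  let max_person := if PySem.Int.mod max_person0 2 = 0 then max_person0 - 1 else max_person0
  (PySem.List.pyRange 1 (max_person + 1) 2).foldl
    (fun no_of_people i => if human_pyramid i ≤ max_weight then i else no_of_people) 0

-- ===== PORT B =====
-- the `while lo + 1 < hi` loop of Source B
def bsLoop (max_weight lo hi : Int) : Int :=
  if lo + 1 < hi then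
    let mid := PySem.Int.floordiv (lo + hi) 2
    if 50 * mid * mid ≤ max_weight then bsLoop max_weight mid hi
    else bsLoop max_weight lo mid
  else lo
termination_by (hi - lo).toNat
decreasing_by
  all_goals
    have hm : PySem.Int.floordiv (lo + hi) 2 = (lo + hi) / 2 :=
      PySem.Int.floordiv_eq_ediv_of_pos (by norm_num)
    omega

def find_maximum_people_alt (max_weight : Int) : Int :=
  if max_weight < 50 then 0
  else 2 * bsLoop max_weight 1 (PySem.Int.floordiv max_weight 50 + 1) - 1

-- ===== PRECONDITION & SPEC =====
def Spec_find_maximum_people (max_weight : Int) (out : Int) : Prop := out = find_maximum_people_alt max_weight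
instance (max_weight : Int) (out : Int) : Decidable (Spec_find_maximum_people max_weight out) := by unfold Spec_find_maximum_people; infer_instance

-- ===== CLAIM (what is proved, stated in full; the proofs are below) =====
def Claim_equal_find_maximum_people : Prop := ∀ (max_weight : Int), Dom_find_maximum_people max_weight → Spec_find_maximum_people max_weight (find_maximum_people max_weight)

-- ===== LEMMAS AND PROOFS =====

-- closed form of A's recursion on the odd arguments it is called with
lemma pyr_closed : ∀ k : Nat, human_pyramid (1 + 2 * (k : Int)) = 50 * ((k : Int) + 1) * ((k : Int) + 1) := by
  intro k
  induction k with
  | zero => simp [human_pyramid]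
  | succ k ih =>
    rw [human_pyramid]
    have h1 : ¬ (1 + 2 * ((k + 1 : Nat) : Int) = 1) := by push_cast; omega
    have h2 : (1 : Int) < 1 + 2 * ((k + 1 : Nat) : Int) := by push_cast; omega
    rw [if_neg h1, if_pos h2]
    have h3 : 1 + 2 * ((k + 1 : Nat) : Int) - 2 = 1 + 2 * (k : Int) := by push_cast; ring
    rw [h3, ih]
    push_cast; ring

-- the binary search returns the largest k with 50*k*k ≤ max_weight
lemma bsLoop_spec : ∀ (max_weight lo hi : Int), 1 ≤ lo → lo + 1 ≤ hi →
    50 * lo * lo ≤ max_weight → max_weight < 50 * hi * hi →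
    1 ≤ bsLoop max_weight lo hi ∧
    50 * bsLoop max_weight lo hi * bsLoop max_weight lo hi ≤ max_weight ∧
    max_weight < 50 * (bsLoop max_weight lo hi + 1) * (bsLoop max_weight lo hi + 1) := by
  intro max_weight lo hi
  fun_induction bsLoop max_weight lo hi with
  | case1 lo hi h mid hle ih =>
    intro h1 h2 h3 h4
    have hm : mid = (lo + hi) / 2 := PySem.Int.floordiv_eq_ediv_of_pos (by norm_num)
    exact ih (by omega) (by omega) hle h4
  | case2 lo hi h mid hgt ih =>
    intro h1 h2 h3 h4
    have hm : mid = (lo + hi) / 2 := PySem.Int.floordiv_eq_ediv_of_pos (by norm_num)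
    exact ih h1 (by omega) h3 (by omega)
  | case3 lo hi h =>
    intro h1 h2 h3 h4
    have hhi : hi = lo + 1 := by omega
    exact ⟨h1, h3, by rw [← hhi]; exact h4⟩

-- A's fold picks the last satisfying candidate: with the threshold r it equals 2*r - 1
lemma fold_last (mw r : Int) (hr : 1 ≤ r)
    (hmono : ∀ k : Int, 0 ≤ k → (50 * (k + 1) * (k + 1) ≤ mw ↔ k + 1 ≤ r)) :
    ∀ M : Nat, r ≤ (M : Int) →
      (List.range M).foldl
        (fun (acc : Int) (k : Nat) => if 50 * ((k : Int) + 1) * ((k : Int) + 1) ≤ mw then 1 + 2 * (k : Int) else acc) 0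
        = 2 * r - 1 := by
  intro M
  induction M with
  | zero => intro h; simp at h; omega
  | succ M ih =>
    intro hM
    rw [List.range_succ, List.foldl_append]
    simp only [List.foldl_cons, List.foldl_nil]
    by_cases hc : 50 * ((M : Int) + 1) * ((M : Int) + 1) ≤ mw
    · rw [if_pos hc]
      have := (hmono (M : Int) (by positivity)).mp hc
      omega
    · rw [if_neg hc]
      have hMr : ¬ ((M : Int) + 1 ≤ r) := fun h => hc ((hmono (M : Int) (by positivity)).mpr h)
      exact ih (by omega)

lemma main_eq (mw : Int) : find_maximum_people mw = find_maximum_people_alt mw := by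
  have hq : PySem.Int.floordiv mw 50 = mw / 50 := PySem.Int.floordiv_eq_ediv_of_pos (by norm_num)
  have hmod : PySem.Int.mod (mw / 50) 2 = (mw / 50) % 2 := PySem.Int.mod_eq_emod_of_pos (by norm_num)
  have hql : 50 * (mw / 50) ≤ mw := by omega
  have hqu : mw < 50 * (mw / 50 + 1) := by omega
  simp only [find_maximum_people, find_maximum_people_alt, hq, hmod]
  set q := mw / 50 with hqd
  set mp := if q % 2 = 0 then q - 1 else q with hmpd
  have hmpf : mp % 2 = 1 ∧ q - 1 ≤ mp ∧ mp ≤ q := by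
    rw [hmpd]; split_ifs with h <;> omega
  by_cases hlt : mw < 50
  · -- q ≤ 0, so the range is empty and A's fold returns 0; B returns 0 directly
    have hq0 : q ≤ 0 := by omega
    rw [PySem.List.pyRange_of_pos 1 (mp + 1) (by norm_num : (0:Int) < 2),
        if_neg (by omega : ¬ (1 < mp + 1))]
    simp [hlt]
  · have hlt' : 50 ≤ mw := by omega
    have hq1 : 1 ≤ q := by omega
    have hhi : mw < 50 * (q + 1) * (q + 1) := by nlinarith
    obtain ⟨hr1, hrle, hrlt⟩ :=
      bsLoop_spec mw 1 (q + 1) le_rfl (by omega) (by omega) hhi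
    set r : Int := bsLoop mw 1 (q + 1) with hrdef
    have hmono : ∀ k : Int, 0 ≤ k → (50 * (k + 1) * (k + 1) ≤ mw ↔ k + 1 ≤ r) := by
      intro k hk
      constructor
      · intro h; by_contra hgt; rw [not_le] at hgt; nlinarith
      · intro h; nlinarith
    have hmp1 : 1 < mp + 1 := by omega
    rw [PySem.List.pyRange_of_pos 1 (mp + 1) (by norm_num : (0:Int) < 2), if_pos hmp1]
    have harg : (mp + 1 - 1 + 2 - 1) / 2 = (mp + 1) / 2 := by omega
    rw [harg, List.foldl_map]
    have hcong : (List.range ((mp + 1) / 2).toNat).foldl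
        (fun (acc : Int) (k : Nat) => if human_pyramid (1 + 2 * (k : Int)) ≤ mw then 1 + 2 * (k : Int) else acc) 0
        = (List.range ((mp + 1) / 2).toNat).foldl
        (fun (acc : Int) (k : Nat) => if 50 * ((k : Int) + 1) * ((k : Int) + 1) ≤ mw then 1 + 2 * (k : Int) else acc) 0 := by
      apply PySem.List.foldl_congr_mem
      intro acc k _
      rw [pyr_closed k]
    rw [hcong]
    have hrq : r * r ≤ q := by nlinarith
    have hrmp : 2 * r - 1 ≤ mp := by
      have hsq : 2 * r - 1 ≤ r * r := by nlinarith
      rw [hmpd]; split_ifs with h <;> omega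
    have hrM : r ≤ (((mp + 1) / 2).toNat : Int) := by
      have ht : (((mp + 1) / 2).toNat : Int) = (mp + 1) / 2 := Int.toNat_of_nonneg (by omega)
      omega
    rw [fold_last mw r hr1 hmono ((mp + 1) / 2).toNat hrM]
    rw [if_neg (by omega : ¬ mw < 50)]

-- ===== VERDICT (by name: the statement is the Claim_ definition above) =====
theorem find_maximum_people_spec : Claim_equal_find_maximum_people := by
  intro mw _
  unfold Spec_find_maximum_people
  exact main_eq mw
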